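-- pv_equiv track=rewrite | github.com/ibrmaj/Leetcode | amazon/trial.py | computeMaxNetworkThroughput
-- ===== SOURCE A (Python) =====
-- def computeMaxNetworkThroughput(serverRates: list[int]) -> int:
--     new = []
--     for i in sorted(serverRates):
--         new.insert(0, i)
--
--     numservers = len(serverRates) // 3
--     res = 0
--     ls = []
--     for i in range(numservers * 3):
--         ls.append(new[i])
--         if len(ls) == 3:
--             ls.sort()
--             res += ls[1]
--             ls = []
--             continue
--
--     return res
-- ===== SOURCE B (Python) =====
-- def computeMaxNetworkThroughput(serverRates: list[int]) -> int:
--     rates = sorted(serverRates)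
--     total = 0
--     for i in range(len(rates) % 3 + 1, len(rates), 3):
--         total += rates[i]
--     return total
-- ===== Notes on version B (the rewrite author's own statement) =====
-- stated objective: faster
-- what changed: Instead of building a descending list by repeated insert(0) and then buffering and re-sorting each consecutive triple, B sorts ascending once and accumulates the elements at stride 3 starting at index n%3+1 (the middle of each ascending triple above the discarded remainder), with no reversal, no buffering and no per-triple sorts.
import Mathlib
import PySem

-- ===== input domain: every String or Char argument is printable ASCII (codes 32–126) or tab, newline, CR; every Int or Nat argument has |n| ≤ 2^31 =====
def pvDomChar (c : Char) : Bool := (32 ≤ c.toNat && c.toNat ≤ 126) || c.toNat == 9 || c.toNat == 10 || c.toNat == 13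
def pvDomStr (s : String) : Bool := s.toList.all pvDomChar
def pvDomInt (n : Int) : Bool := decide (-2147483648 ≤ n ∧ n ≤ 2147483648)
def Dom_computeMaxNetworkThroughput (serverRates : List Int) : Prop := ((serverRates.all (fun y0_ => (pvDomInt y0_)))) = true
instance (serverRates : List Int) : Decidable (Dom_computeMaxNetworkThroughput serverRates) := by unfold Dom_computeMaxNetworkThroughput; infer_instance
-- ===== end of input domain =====

-- B replaces A's quadratic insert-at-front reversal and per-triple buffer-and-sort
-- loop by one ascending sort and an accumulation at stride 3 from index n%3+1
-- (the middle of each ascending triple above the discarded remainder); objective: faster.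

-- ===== PORT A =====
-- loop body of A's second loop: append new[i] to ls; when it reaches 3 elements, sort it and add its middle
def pvStepA (d : List Int) (st : Int × List Int) (i : Int) : Int × List Int :=
  let ls := st.2 ++ [PySem.List.pyGetD d i 0]
  if ls.length = 3 then
    (st.1 + PySem.List.pyGetD (PySem.List.sorted ls (fun x => x) false) 1 0, ([] : List Int))
  else (st.1, ls)

def computeMaxNetworkThroughput (serverRates : List Int) : Int :=
  let new := (PySem.List.sorted serverRates (fun x => x) false).foldl
      (fun acc i => PySem.List.insert acc 0 i) []
  let numservers := PySem.Int.floordiv (serverRates.length : Int) 3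
  let st := (PySem.List.pyRange 0 (numservers * 3) 1).foldl (pvStepA new) (0, [])
  st.1

-- ===== PORT B =====
def computeMaxNetworkThroughput_alt (serverRates : List Int) : Int :=
  let rates := PySem.List.sorted serverRates (fun x => x) false
  (PySem.List.pyRange (PySem.Int.mod (rates.length : Int) 3 + 1) (rates.length : Int) 3).foldl
    (fun total i => total + PySem.List.pyGetD rates i 0) 0

-- ===== PRECONDITION & SPEC =====
def Spec_computeMaxNetworkThroughput (serverRates : List Int) (out : Int) : Prop := out = computeMaxNetworkThroughput_alt serverRates
instance (serverRates : List Int) (out : Int) : Decidable (Spec_computeMaxNetworkThroughput serverRates out) := by unfold Spec_computeMaxNetworkThroughput; infer_instance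

-- ===== CLAIM (what is proved, stated in full; the proofs are below) =====
def Claim_equal_computeMaxNetworkThroughput : Prop := ∀ (serverRates : List Int), Dom_computeMaxNetworkThroughput serverRates → Spec_computeMaxNetworkThroughput serverRates (computeMaxNetworkThroughput serverRates)

-- ===== LEMMAS AND PROOFS =====

-- folding insert-at-position-0 builds the reverse
theorem pv_foldl_insert_zero (xs acc : List Int) :
    xs.foldl (fun acc i => PySem.List.insert acc 0 i) acc = xs.reverse ++ acc := by
  induction xs generalizing acc with
  | nil => simp
  | cons x xs ih => simp [PySem.List.insert_zero]

-- descending lists: the element at the later Nat index is ≤ the earlier one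
theorem pv_pyGetD_antitone (d : List Int) (hd : d.Pairwise (fun a b => b ≤ a))
    (i j : Nat) (hij : i < j) (hj : j < d.length) :
    PySem.List.pyGetD d (j : Int) 0 ≤ PySem.List.pyGetD d (i : Int) 0 := by
  have hi : i < d.length := lt_trans hij hj
  rw [PySem.List.pyGetD_natCast, PySem.List.pyGetD_natCast,
      List.getD_eq_getElem d 0 hi, List.getD_eq_getElem d 0 hj]
  exact (List.pairwise_iff_getElem).1 hd i j hi hj hij

-- middle of the sorted 3-element list [a,b,c] with c ≤ b ≤ a is b
theorem pv_mid_sorted_triple (a b c : Int) (hba : b ≤ a) (hcb : c ≤ b) :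
    PySem.List.pyGetD (PySem.List.sorted [a, b, c] (fun x => x) false) 1 0 = b := by
  have hperm : ([c, b, a] : List Int).Perm [a, b, c] := by
    have h1 : ([a, b, c] : List Int).reverse = [c, b, a] := rfl
    exact h1 ▸ List.reverse_perm ([a, b, c] : List Int)
  have hpw : ([c, b, a] : List Int).Pairwise (· ≤ ·) := by
    simp only [List.pairwise_cons, List.mem_cons, List.not_mem_nil,
      List.Pairwise.nil, and_true]
    refine ⟨?_, ?_⟩
    · intro y hy
      rcases hy with h | h | h
      · exact h ▸ hcb
      · exact h ▸ le_trans hcb hba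
      · cases h
    · constructor
      · intro y hy
        rcases hy with h | h
        · exact h ▸ hba
        · cases h
      · intro y hy; cases hy
  have h : PySem.List.sorted [a, b, c] (fun x => x) false = [c, b, a] :=
    PySem.List.sorted_id_eq_of_perm_of_pairwise _ _ hperm hpw
  rw [h]
  simp [PySem.List.pyGetD]

-- step computations for A's loop body
theorem pvStepA_zero (d : List Int) (r i : Int) :
    pvStepA d (r, []) i = (r, [PySem.List.pyGetD d i 0]) := by
  simp [pvStepA]

theorem pvStepA_one (d : List Int) (r a i : Int) :
    pvStepA d (r, [a]) i = (r, [a, PySem.List.pyGetD d i 0]) := by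
  simp [pvStepA]

theorem pvStepA_two (d : List Int) (r a b i : Int) :
    pvStepA d (r, [a, b]) i =
      (r + PySem.List.pyGetD
        (PySem.List.sorted [a, b, PySem.List.pyGetD d i 0] (fun x => x) false) 1 0, []) := by
  simp [pvStepA]

-- core loop invariant: A's stateful triple loop over a descending list sums the elements at 3k+1
theorem pv_loop (d : List Int) (hd : d.Pairwise (fun a b => b ≤ a)) (n : Nat)
    (hn : 3 * n ≤ d.length) (r : Int) :
    (PySem.List.pyRange 0 (3 * (n : Int)) 1).foldl (pvStepA d) (r, []) =
      (r + ((List.range n).map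
        (fun (k : Nat) => PySem.List.pyGetD d (3 * (k : Int) + 1) 0)).sum, []) := by
  induction n generalizing r with
  | zero =>
    have h1 : PySem.List.pyRange 0 (3 * ((0 : Nat) : Int)) 1 = [] :=
      PySem.List.pyRange_one_eq_nil (by norm_num)
    rw [h1]; simp
  | succ n ih =>
    have hsplit : PySem.List.pyRange 0 (3 * ((n + 1 : Nat) : Int)) 1 =
        PySem.List.pyRange 0 (3 * (n : Int)) 1 ++
          PySem.List.pyRange (3 * (n : Int)) (3 * ((n + 1 : Nat) : Int)) 1 := by
      apply PySem.List.pyRange_one_append <;> push_cast <;> omega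
    have htail : PySem.List.pyRange (3 * (n : Int)) (3 * ((n + 1 : Nat) : Int)) 1 =
        [3 * (n : Int), 3 * (n : Int) + 1, 3 * (n : Int) + 1 + 1] := by
      rw [PySem.List.pyRange_one_cons (by push_cast; omega),
          PySem.List.pyRange_one_cons (by push_cast; omega),
          PySem.List.pyRange_one_cons (by push_cast; omega),
          PySem.List.pyRange_one_eq_nil (by push_cast; omega)]
    have hlen : 3 * n ≤ d.length := by omega
    have hba : PySem.List.pyGetD d (3 * (n : Int) + 1) 0 ≤ PySem.List.pyGetD d (3 * (n : Int)) 0 := by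
      have h := pv_pyGetD_antitone d hd (3 * n) (3 * n + 1) (by omega) (by omega)
      have e0 : ((3 * n : Nat) : Int) = 3 * (n : Int) := by push_cast; ring
      have e1 : ((3 * n + 1 : Nat) : Int) = 3 * (n : Int) + 1 := by push_cast; ring
      rwa [e0, e1] at h
    have hcb : PySem.List.pyGetD d (3 * (n : Int) + 1 + 1) 0 ≤
        PySem.List.pyGetD d (3 * (n : Int) + 1) 0 := by
      have h := pv_pyGetD_antitone d hd (3 * n + 1) (3 * n + 2) (by omega) (by omega)
      have e1 : ((3 * n + 1 : Nat) : Int) = 3 * (n : Int) + 1 := by push_cast; ring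
      have e2 : ((3 * n + 2 : Nat) : Int) = 3 * (n : Int) + 1 + 1 := by push_cast; ring
      rwa [e1, e2] at h
    have hmid := pv_mid_sorted_triple (PySem.List.pyGetD d (3 * (n : Int)) 0)
      (PySem.List.pyGetD d (3 * (n : Int) + 1) 0)
      (PySem.List.pyGetD d (3 * (n : Int) + 1 + 1) 0) hba hcb
    rw [hsplit, List.foldl_append, ih hlen, htail, List.foldl_cons, pvStepA_zero,
        List.foldl_cons, pvStepA_one, List.foldl_cons, pvStepA_two, List.foldl_nil,
        hmid]
    have hstep : ((List.range (n + 1)).map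
          (fun (k : Nat) => PySem.List.pyGetD d (3 * (k : Int) + 1) 0)).sum =
        ((List.range n).map
          (fun (k : Nat) => PySem.List.pyGetD d (3 * (k : Int) + 1) 0)).sum +
          PySem.List.pyGetD d (3 * (n : Int) + 1) 0 := by
      rw [List.range_succ]; simp
    simp only [Prod.mk.injEq]
    exact ⟨by rw [hstep]; ring, trivial⟩

-- bridge: a map-over-range list sum is a Finset.range sum
theorem pv_sum_range_eq (f : Nat → Int) (m : Nat) :
    ((List.range m).map f).sum = ∑ i ∈ Finset.range m, f i := by
  induction m with
  | zero => simp
  | succ m ih => rw [List.range_succ, Finset.sum_range_succ]; simp [ih]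

theorem computeMaxNetworkThroughput_eq (serverRates : List Int) :
    computeMaxNetworkThroughput serverRates = computeMaxNetworkThroughput_alt serverRates := by
  set asc := PySem.List.sorted serverRates (fun x => x) false with hasc
  have hlen : asc.length = serverRates.length := PySem.List.length_sorted _ _ _
  set n := serverRates.length with hn
  set m := n / 3 with hm
  set r := n % 3 with hr
  have hnm : n = 3 * m + r := by omega
  have hpair : asc.reverse.Pairwise (fun a b : Int => b ≤ a) :=
    (List.pairwise_reverse).2 (PySem.List.sorted_pairwise serverRates (fun x => x))
  -- A's value
  have hfl : PySem.Int.floordiv ((n : Nat) : Int) 3 = ((m : Nat) : Int) := by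
    rw [PySem.Int.floordiv_eq_ediv_of_pos (by norm_num)]; omega
  have h3n : 3 * m ≤ asc.reverse.length := by
    rw [List.length_reverse, hlen]; omega
  have hA : computeMaxNetworkThroughput serverRates =
      ((List.range m).map
        (fun (k : Nat) => PySem.List.pyGetD asc.reverse (3 * (k : Int) + 1) 0)).sum := by
    simp only [computeMaxNetworkThroughput]
    rw [pv_foldl_insert_zero, List.append_nil, ← hasc, ← hn, hfl,
        show (((m : Nat) : Int) * 3) = 3 * ((m : Nat) : Int) from by ring,
        pv_loop asc.reverse hpair m h3n 0]
    simp
  -- indices: pyGetD on the reverse, inside the relevant range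
  have hidx : ∀ k : Nat, k < m →
      PySem.List.pyGetD asc.reverse (3 * (k : Int) + 1) 0 =
        asc.getD (r + 1 + 3 * (m - 1 - k)) 0 := by
    intro k hk
    have hb : 3 * k + 1 < asc.reverse.length := by
      rw [List.length_reverse, hlen]; omega
    have e : (3 * (k : Int) + 1) = ((3 * k + 1 : Nat) : Int) := by push_cast; ring
    rw [e, PySem.List.pyGetD_natCast, List.getD_eq_getElem _ 0 hb,
        List.getElem_reverse]
    have hb2 : r + 1 + 3 * (m - 1 - k) < asc.length := by rw [hlen]; omega
    rw [List.getD_eq_getElem _ 0 hb2]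
    congr 1
    omega
  -- B's value
  have hcnt : (if ((r : Nat) : Int) + 1 < ((n : Nat) : Int) then
      ((((n : Nat) : Int) - (((r : Nat) : Int) + 1) + 3 - 1) / 3).toNat else 0) = m := by
    split_ifs with h
    · omega
    · omega
  have hB : computeMaxNetworkThroughput_alt serverRates =
      ((List.range m).map
        (fun k => asc.getD (r + 1 + 3 * k) 0)).sum := by
    simp only [computeMaxNetworkThroughput_alt]
    rw [← hasc, hlen]
    have hmod : PySem.Int.mod ((n : Nat) : Int) 3 = ((r : Nat) : Int) := by
      rw [PySem.Int.mod_eq_emod_of_pos (by norm_num)]; omega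
    rw [hmod, PySem.List.pyRange_of_pos _ _ (by norm_num : (0:Int) < 3), hcnt,
        List.foldl_map, PySem.List.foldl_add]
    simp only [zero_add]
    congr 1
    apply List.map_congr_left
    intro k hk
    have hkm : k < m := List.mem_range.1 hk
    have hb : r + 1 + 3 * k < asc.length := by rw [hlen]; omega
    have e : ((r : Nat) : Int) + 1 + 3 * (k : Int) = ((r + 1 + 3 * k : Nat) : Int) := by
      push_cast; ring
    rw [e, PySem.List.pyGetD_natCast]
  -- reindex k ↦ m-1-k
  rw [hA, hB]
  rw [List.map_congr_left (fun k hk => hidx k (List.mem_range.1 hk))]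
  rw [pv_sum_range_eq, pv_sum_range_eq]
  exact Finset.sum_range_reflect (fun k => asc.getD (r + 1 + 3 * k) 0) m

-- ===== VERDICT (by name: the statement is the Claim_ definition above) =====
theorem computeMaxNetworkThroughput_spec : Claim_equal_computeMaxNetworkThroughput := by
  intro serverRates _
  unfold Spec_computeMaxNetworkThroughput
  exact computeMaxNetworkThroughput_eq serverRates
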